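-- pv_equiv track=rewrite | github.com/arturoornelasb/tibia-bonelord-469-cipher | scripts/core/deep_anagram_attack.py | is_partial_anagram
-- ===== SOURCE A (Python) =====
-- from collections import Counter
--
-- def get_letter_counts(word):
--     return Counter(word.upper())
--
-- def is_partial_anagram(word1, word2, max_diff=2):
--     """Check if words are anagrams with up to max_diff letter differences."""
--     c1 = get_letter_counts(word1)
--     c2 = get_letter_counts(word2)
--     diff = 0
--     all_letters = set(list(c1.keys()) + list(c2.keys()))
--     for letter in all_letters:
--         diff += abs(c1.get(letter, 0) - c2.get(letter, 0))
--     return diff <= max_diff * 2  # each substitution counts as 2 (remove+add)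
-- ===== SOURCE B (Python) =====
-- def is_partial_anagram(word1, word2, max_diff=2):
--     """Check if words are anagrams with up to max_diff letter differences."""
--     s1 = sorted(word1.upper())
--     s2 = sorted(word2.upper())
--     i = j = diff = 0
--     while i < len(s1) and j < len(s2):
--         if s1[i] == s2[j]:
--             i += 1
--             j += 1
--         elif s1[i] < s2[j]:
--             diff += 1
--             i += 1
--         else:
--             diff += 1
--             j += 1
--     diff += (len(s1) - i) + (len(s2) - j)
--     return diff <= max_diff * 2
-- ===== Notes on version B (the rewrite author's own statement) =====
-- stated objective: alternative
-- what changed: Replaces the Counter-histogram sum of absolute count differences by sorting both uppercased words and counting unmatched characters in a single two-pointer merge pass (no dict/set is built).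
import Mathlib
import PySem

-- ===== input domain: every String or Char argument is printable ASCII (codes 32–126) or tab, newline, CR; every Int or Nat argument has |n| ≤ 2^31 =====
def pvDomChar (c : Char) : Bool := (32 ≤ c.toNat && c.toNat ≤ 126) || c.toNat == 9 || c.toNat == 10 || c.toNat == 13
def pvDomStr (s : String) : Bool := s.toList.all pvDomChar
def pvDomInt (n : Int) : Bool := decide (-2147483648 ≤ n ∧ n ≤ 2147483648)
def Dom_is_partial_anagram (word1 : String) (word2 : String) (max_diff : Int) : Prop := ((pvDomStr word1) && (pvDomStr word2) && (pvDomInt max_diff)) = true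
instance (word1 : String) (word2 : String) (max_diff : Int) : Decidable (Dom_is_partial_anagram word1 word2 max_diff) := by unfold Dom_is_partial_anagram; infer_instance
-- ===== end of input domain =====

-- B replaces A's Counter-histogram sum of |count differences| by a sort-then-merge
-- two-pointer pass over the uppercased words (alternative algorithm, similar cost).


-- ===== PORT A =====
-- get_letter_counts(word) = Counter(word.upper())
def pvGetLetterCounts (word : String) : PySem.Dict Char Int :=
  PySem.Dict.counter (PySem.Str.upper word).toList

-- A's for-loop over the Python set all_letters only SUMS (order-independent),
-- so folding over the PySem.Set element list is exact
def is_partial_anagram (word1 : String) (word2 : String) (max_diff : Int) : Bool :=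
  let c1 := pvGetLetterCounts word1
  let c2 := pvGetLetterCounts word2
  let all_letters := PySem.Set.ofList (c1.keys ++ c2.keys)
  let diff : Int := all_letters.foldl (fun acc letter => acc + |c1.getD letter 0 - c2.getD letter 0|) 0
  decide (diff ≤ max_diff * 2)

-- ===== PORT B =====
-- Source B's while-loop over indices i, j of the two sorted lists, as the obvious
-- structural recursion; the base cases add the remaining lengths (Source B's final
-- 'diff += (len(s1) - i) + (len(s2) - j)')
def pvMergeDiff : List Char → List Char → Nat
  | [], ys => ys.length
  | a :: xs, [] => (a :: xs).length
  | a :: xs, b :: ys =>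
      if a = b then pvMergeDiff xs ys
      else if a < b then 1 + pvMergeDiff xs (b :: ys)
      else 1 + pvMergeDiff (a :: xs) ys
  termination_by xs ys => xs.length + ys.length
  decreasing_by all_goals (simp; try omega)

def is_partial_anagram_alt (word1 : String) (word2 : String) (max_diff : Int) : Bool :=
  let s1 := PySem.List.sorted (PySem.Str.upper word1).toList (fun x => x)
  let s2 := PySem.List.sorted (PySem.Str.upper word2).toList (fun x => x)
  decide ((pvMergeDiff s1 s2 : Int) ≤ max_diff * 2)

-- ===== PRECONDITION & SPEC =====
def Spec_is_partial_anagram (word1 : String) (word2 : String) (max_diff : Int) (out : Bool) : Prop := out = is_partial_anagram_alt word1 word2 max_diff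
instance (word1 : String) (word2 : String) (max_diff : Int) (out : Bool) : Decidable (Spec_is_partial_anagram word1 word2 max_diff out) := by unfold Spec_is_partial_anagram; infer_instance

-- ===== CLAIM (what is proved, stated in full; the proofs are below) =====
def Claim_equal_is_partial_anagram : Prop := ∀ (word1 : String) (word2 : String) (max_diff : Int), Dom_is_partial_anagram word1 word2 max_diff → Spec_is_partial_anagram word1 word2 max_diff (is_partial_anagram word1 word2 max_diff)

-- ===== LEMMAS AND PROOFS =====

-- summing a list's letter counts over any superset of its letters gives its length
theorem pvCountSumInt (l : List Char) (U : Finset Char) (hU : ∀ c, c ∈ l → c ∈ U) :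
    ∑ c ∈ U, (l.count c : Int) = l.length := by
  have hsub : l.toFinset ⊆ U := fun c hc => hU c (List.mem_toFinset.mp hc)
  rw [← Finset.sum_subset hsub (by intro c _ hc; simp [List.count_eq_zero_of_not_mem (by simpa using hc)])]
  rw [← Nat.cast_sum]
  norm_cast
  exact List.sum_toFinset_count_eq_length l

-- the merge pass on two (≤)-sorted lists computes the sum of |count differences|
-- over any finite superset U of the letters occurring in either list
theorem pvMergeDiff_eq_sum : ∀ (xs ys : List Char), xs.Pairwise (· ≤ ·) → ys.Pairwise (· ≤ ·) →
    ∀ (U : Finset Char), (∀ c, c ∈ xs → c ∈ U) → (∀ c, c ∈ ys → c ∈ U) →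
    (pvMergeDiff xs ys : Int) = ∑ c ∈ U, |(xs.count c : Int) - (ys.count c : Int)|
  | [], ys, _, _, U, _, hUy => by
    simp only [pvMergeDiff]
    rw [Finset.sum_congr rfl (fun c _ => by simp : ∀ c ∈ U, |((List.count c ([]:List Char) : Int)) - (ys.count c : Int)| = (ys.count c : Int))]
    exact (pvCountSumInt ys U hUy).symm
  | a :: xs, [], _, _, U, hUx, _ => by
    simp only [pvMergeDiff]
    rw [Finset.sum_congr rfl (fun c _ => by simp : ∀ c ∈ U, |((List.count c (a::xs) : Int)) - ((List.count c ([]:List Char)) : Int)| = ((a::xs).count c : Int))]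
    exact (pvCountSumInt (a::xs) U hUx).symm
  | a :: xs, b :: ys, hx, hy, U, hUx, hUy => by
    obtain ⟨hax, hx'⟩ := List.pairwise_cons.mp hx
    obtain ⟨hby, hy'⟩ := List.pairwise_cons.mp hy
    by_cases hab : a = b
    · subst hab
      rw [show pvMergeDiff (a::xs) (a::ys) = pvMergeDiff xs ys by simp [pvMergeDiff]]
      rw [pvMergeDiff_eq_sum xs ys hx' hy' U (fun c hc => hUx c (List.mem_cons_of_mem _ hc))
          (fun c hc => hUy c (List.mem_cons_of_mem _ hc))]
      apply Finset.sum_congr rfl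
      intro c _
      congr 1
      simp only [List.count_cons]
      push_cast
      split_ifs <;> ring
    · by_cases hlt : a < b
      · -- a < b : a does not occur in b :: ys, so it is unmatched and adds 1
        have hnotin : a ∉ b :: ys := by
          intro h
          rcases List.mem_cons.mp h with h | h
          · exact hab h
          · exact absurd (hby a h) (not_le.mpr hlt)
        have hcount0 : (b :: ys).count a = 0 := List.count_eq_zero_of_not_mem hnotin
        rw [show pvMergeDiff (a::xs) (b::ys) = 1 + pvMergeDiff xs (b::ys) by
          simp [pvMergeDiff, hab, hlt]]
        have ih := pvMergeDiff_eq_sum xs (b::ys) hx' hy U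
          (fun c hc => hUx c (List.mem_cons_of_mem _ hc)) hUy
        have hterm : ∀ c ∈ U, |((a::xs).count c : Int) - ((b::ys).count c : Int)|
            = |(xs.count c : Int) - ((b::ys).count c : Int)| + (if c = a then 1 else 0) := by
          intro c _
          by_cases hca : c = a
          · subst hca
            simp only [List.count_cons_self, hcount0, Nat.cast_zero, sub_zero, Nat.cast_add,
              Nat.cast_one]
            rw [abs_of_nonneg (by omega), abs_of_nonneg (by omega)]
            norm_num
          · simp [List.count_cons, hca, Ne.symm hca]
        rw [Finset.sum_congr rfl hterm, Finset.sum_add_distrib, ← ih,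
          Finset.sum_ite_eq' U a (fun _ => (1:Int)), if_pos (hUx a (List.mem_cons_self))]
        push_cast
        ring
      · -- b < a : b does not occur in a :: xs, so it is unmatched and adds 1
        have hba : b < a := lt_of_le_of_ne (not_lt.mp hlt) (fun h => hab h.symm)
        have hnotin : b ∉ a :: xs := by
          intro h
          rcases List.mem_cons.mp h with h | h
          · exact hab h.symm
          · exact absurd (hax b h) (not_le.mpr hba)
        have hcount0 : (a :: xs).count b = 0 := List.count_eq_zero_of_not_mem hnotin
        rw [show pvMergeDiff (a::xs) (b::ys) = 1 + pvMergeDiff (a::xs) ys by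
          simp [pvMergeDiff, hab, hlt]]
        have ih := pvMergeDiff_eq_sum (a::xs) ys hx hy' U hUx
          (fun c hc => hUy c (List.mem_cons_of_mem _ hc))
        have hterm : ∀ c ∈ U, |((a::xs).count c : Int) - ((b::ys).count c : Int)|
            = |((a::xs).count c : Int) - (ys.count c : Int)| + (if c = b then 1 else 0) := by
          intro c _
          by_cases hcb : c = b
          · subst hcb
            simp only [List.count_cons_self, hcount0, Nat.cast_zero, zero_sub, Nat.cast_add,
              Nat.cast_one]
            rw [abs_of_nonpos (by omega), abs_of_nonpos (by omega)]
            push_cast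
            norm_num
          · simp [List.count_cons, hcb, Ne.symm hcb]
        rw [Finset.sum_congr rfl hterm, Finset.sum_add_distrib, ← ih,
          Finset.sum_ite_eq' U b (fun _ => (1:Int)), if_pos (hUy b (List.mem_cons_self))]
        push_cast
        ring
  termination_by xs ys => xs.length + ys.length
  decreasing_by all_goals (simp; try omega)

-- A's Counter/set fold is that same sum over the letters of both words
theorem pvA_eq_sum (l1 l2 : List Char) :
    (PySem.Set.ofList ((PySem.Dict.counter l1).keys ++ (PySem.Dict.counter l2).keys)).foldl
      (fun acc c => acc + |(PySem.Dict.counter l1).getD c 0 - (PySem.Dict.counter l2).getD c 0|) 0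
    = ∑ c ∈ (l1 ++ l2).toFinset, |(l1.count c : Int) - (l2.count c : Int)| := by
  rw [PySem.Dict.keys_counter, PySem.Dict.keys_counter]
  set S := PySem.Set.ofList (PySem.Set.ofList l1 ++ PySem.Set.ofList l2) with hS
  have hmem : ∀ c, c ∈ S ↔ c ∈ l1 ∨ c ∈ l2 := by
    intro c
    simp [hS, PySem.Set.mem_ofList]
  have hnd : S.Nodup := PySem.Set.nodup_ofList _
  rw [PySem.List.foldl_add S (fun c => |(PySem.Dict.counter l1).getD c 0 - (PySem.Dict.counter l2).getD c 0|) 0]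
  simp only [PySem.Dict.getD_counter, zero_add]
  rw [← List.sum_toFinset _ hnd]
  apply Finset.sum_congr
  · ext c
    simp [List.mem_toFinset, hmem c]
  · intro c _; rfl

-- ===== VERDICT (by name: the statement is the Claim_ definition above) =====
theorem is_partial_anagram_spec : Claim_equal_is_partial_anagram := by
  intro word1 word2 max_diff _
  unfold Spec_is_partial_anagram
  let l1 := (PySem.Str.upper word1).toList
  let l2 := (PySem.Str.upper word2).toList
  have p1 := PySem.List.sorted_perm l1 (fun x => x) false
  have p2 := PySem.List.sorted_perm l2 (fun x => x) false
  have key : (PySem.Set.ofList ((PySem.Dict.counter l1).keys ++ (PySem.Dict.counter l2).keys)).foldl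
      (fun acc c => acc + |(PySem.Dict.counter l1).getD c 0 - (PySem.Dict.counter l2).getD c 0|) 0
      = (pvMergeDiff (PySem.List.sorted l1 (fun x => x)) (PySem.List.sorted l2 (fun x => x)) : Int) := by
    rw [pvA_eq_sum,
      pvMergeDiff_eq_sum _ _ (PySem.List.sorted_pairwise l1 _) (PySem.List.sorted_pairwise l2 _)
        ((l1 ++ l2).toFinset)
        (fun c hc => List.mem_toFinset.mpr (List.mem_append_left _ (p1.mem_iff.mp hc)))
        (fun c hc => List.mem_toFinset.mpr (List.mem_append_right _ (p2.mem_iff.mp hc)))]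
    exact Finset.sum_congr rfl (fun c _ => by rw [p1.count_eq, p2.count_eq])
  exact congrArg (fun d : Int => decide (d ≤ max_diff * 2)) key
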